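-- pv_equiv track=rewrite | github.com/floratiew/ummdashboard | app.py | _extract_all_area_names
-- ===== SOURCE A (Python) =====
-- from typing import Iterable, List, Sequence
--
-- def _extract_all_area_names(row) -> List[str]:
--     """Extract area names from areas_json AND from production/generation/transmission units"""
--     areas = set()
--
--     # Get areas from areas_json
--     for item in row.get("areas_json", []):
--         if isinstance(item, dict) and item.get("name"):
--             areas.add(str(item["name"]))
--
--     # Get areas from production units
--     for item in row.get("production_units_json", []):
--         if isinstance(item, dict) and item.get("areaName"):
--             areas.add(str(item["areaName"]))
--
--     # Get areas from generation units
--     for item in row.get("generation_units_json", []):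
--         if isinstance(item, dict) and item.get("areaName"):
--             areas.add(str(item["areaName"]))
--
--     # Get areas from transmission units
--     for item in row.get("transmission_units_json", []):
--         if isinstance(item, dict):
--             # Transmission units may have inAreaName and outAreaName
--             if item.get("inAreaName"):
--                 areas.add(str(item["inAreaName"]))
--             if item.get("outAreaName"):
--                 areas.add(str(item["outAreaName"]))
--
--     return sorted(areas)
-- ===== SOURCE B (Python) =====
-- def _extract_all_area_names(row):
--     """Extract area names: one data-driven pass, then sort and adjacent-dedup."""
--     spec = [
--         ("areas_json", ["name"]),
--         ("production_units_json", ["areaName"]),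
--         ("generation_units_json", ["areaName"]),
--         ("transmission_units_json", ["inAreaName", "outAreaName"]),
--     ]
--     names = [str(v)
--              for field, keys in spec
--              for item in row.get(field, []) if isinstance(item, dict)
--              for key in keys
--              for v in [item.get(key)] if v]
--     names.sort()
--     out = []
--     for x in names:
--         if not out or out[-1] != x:
--             out.append(x)
--     return out
-- ===== Notes on version B (the rewrite author's own statement) =====
-- stated objective: alternative
-- what changed: Replaces the four unrolled set-accumulating loops by one data-driven comprehension over a (field, keys) spec table, and replaces the set with sort-then-adjacent-dedup for the unique sorted output.
import Mathlib
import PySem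

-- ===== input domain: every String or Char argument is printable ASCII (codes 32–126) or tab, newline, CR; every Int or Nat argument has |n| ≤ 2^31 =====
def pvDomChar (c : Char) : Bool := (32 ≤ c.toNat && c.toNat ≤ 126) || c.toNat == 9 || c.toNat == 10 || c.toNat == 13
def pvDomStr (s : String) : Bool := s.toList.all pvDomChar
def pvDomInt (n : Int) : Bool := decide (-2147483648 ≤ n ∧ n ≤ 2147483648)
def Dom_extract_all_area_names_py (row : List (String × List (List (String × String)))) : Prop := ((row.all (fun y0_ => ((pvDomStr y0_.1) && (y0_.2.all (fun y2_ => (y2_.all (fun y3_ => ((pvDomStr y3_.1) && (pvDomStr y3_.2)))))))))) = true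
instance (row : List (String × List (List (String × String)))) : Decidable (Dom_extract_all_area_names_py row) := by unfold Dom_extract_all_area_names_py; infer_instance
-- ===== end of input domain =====

-- B replaces A's four unrolled set-accumulating loops by one data-driven pass over a
-- (field, keys) spec table followed by sort + adjacent dedup (objective: alternative).


-- ===== PORT A =====
-- literal transliteration of A: four loops conditionally adding into a set, then sorted(areas).
-- isinstance(item, dict) is always true under this typing (every item IS a dict) and is dropped.
-- str(val) is the identity here: every value is already a string.
def extract_all_area_names_py (row : List (String × List (List (String × String)))) : List String :=
  let rowD := PySem.Dict.ofList row
  let areas : PySem.Set String := PySem.Set.empty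
  -- for item in row.get("areas_json", []): if item.get("name"): areas.add(str(item["name"]))
  let areas := (PySem.Dict.getD rowD "areas_json" []).foldl (fun areas item =>
    match PySem.Dict.get? (PySem.Dict.ofList item) "name" with
    | some v => if v ≠ "" then PySem.Set.add areas v else areas
    | none => areas) areas
  -- for item in row.get("production_units_json", []): …
  let areas := (PySem.Dict.getD rowD "production_units_json" []).foldl (fun areas item =>
    match PySem.Dict.get? (PySem.Dict.ofList item) "areaName" with
    | some v => if v ≠ "" then PySem.Set.add areas v else areas
    | none => areas) areas
  -- for item in row.get("generation_units_json", []): …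
  let areas := (PySem.Dict.getD rowD "generation_units_json" []).foldl (fun areas item =>
    match PySem.Dict.get? (PySem.Dict.ofList item) "areaName" with
    | some v => if v ≠ "" then PySem.Set.add areas v else areas
    | none => areas) areas
  -- for item in row.get("transmission_units_json", []): two conditional adds
  let areas := (PySem.Dict.getD rowD "transmission_units_json" []).foldl (fun areas item =>
    let areas := match PySem.Dict.get? (PySem.Dict.ofList item) "inAreaName" with
      | some v => if v ≠ "" then PySem.Set.add areas v else areas
      | none => areas
    match PySem.Dict.get? (PySem.Dict.ofList item) "outAreaName" with
      | some v => if v ≠ "" then PySem.Set.add areas v else areas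
      | none => areas) areas
  PySem.List.sorted areas (fun x => x) false

-- ===== PORT B =====
-- the (json_field, keys) spec table of Source B
def pvAreaSpec : List (String × List String) :=
  [("areas_json", ["name"]),
   ("production_units_json", ["areaName"]),
   ("generation_units_json", ["areaName"]),
   ("transmission_units_json", ["inAreaName", "outAreaName"])]

-- transliteration of Source B: one comprehension over the spec, names.sort(), adjacent dedup.
def extract_all_area_names_py_alt (row : List (String × List (List (String × String)))) : List String :=
  let names := pvAreaSpec.flatMap (fun fk =>
    (PySem.Dict.getD (PySem.Dict.ofList row) fk.1 []).flatMap (fun item =>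
      fk.2.flatMap (fun key =>
        match PySem.Dict.get? (PySem.Dict.ofList item) key with
        | some v => if v ≠ "" then [v] else []
        | none => [])))
  let names := PySem.List.sorted names (fun x => x) false
  -- out = []; for x in names: if not out or out[-1] != x: out.append(x)
  -- (out[-1] on a nonempty list is its last element, so the test 'not out or out[-1] != x'
  --  is exactly 'out.getLast? ≠ some x')
  names.foldl (fun out x => if out.getLast? = some x then out else out ++ [x]) []

-- ===== PRECONDITION & SPEC =====
def Spec_extract_all_area_names_py (row : List (String × List (List (String × String)))) (out : List String) : Prop := out = extract_all_area_names_py_alt row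
instance (row : List (String × List (List (String × String)))) (out : List String) : Decidable (Spec_extract_all_area_names_py row out) := by unfold Spec_extract_all_area_names_py; infer_instance

-- ===== CLAIM (what is proved, stated in full; the proofs are below) =====
def Claim_equal_extract_all_area_names_py : Prop := ∀ (row : List (String × List (List (String × String)))), Dom_extract_all_area_names_py row → Spec_extract_all_area_names_py row (extract_all_area_names_py row)

-- ===== LEMMAS AND PROOFS =====

-- the 0/1-element list of names a single (item, key) pair contributes
def pvExt (key : String) (item : List (String × String)) : List String :=
  match PySem.Dict.get? (PySem.Dict.ofList item) key with
  | some v => if v ≠ "" then [v] else []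
  | none => []

theorem pvStep_eq (key : String) (item : List (String × String)) (s : PySem.Set String) :
    (match PySem.Dict.get? (PySem.Dict.ofList item) key with
     | some v => if v ≠ "" then PySem.Set.add s v else s
     | none => s) = (pvExt key item).foldl PySem.Set.add s := by
  unfold pvExt
  cases PySem.Dict.get? (PySem.Dict.ofList item) key with
  | none => rfl
  | some v => by_cases h : v = "" <;> simp [h, List.foldl]

theorem pvFold_flat {α : Type} (f : α → List String) (l : List α) (s : PySem.Set String) :
    l.foldl (fun s x => (f x).foldl PySem.Set.add s) s = (l.flatMap f).foldl PySem.Set.add s := by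
  induction l generalizing s with
  | nil => rfl
  | cons x t ih => simp [List.foldl, List.flatMap_cons, List.foldl_append, ih]

theorem pvFold_flat2 {α : Type} (f g : α → List String) (l : List α) (s : PySem.Set String) :
    l.foldl (fun s x => (g x).foldl PySem.Set.add ((f x).foldl PySem.Set.add s)) s
      = (l.flatMap (fun x => f x ++ g x)).foldl PySem.Set.add s := by
  induction l generalizing s with
  | nil => rfl
  | cons x t ih => simp [List.foldl, List.flatMap_cons, List.foldl_append, ih]

-- adjacent dedup of the tail, given the last emitted element
def pvDD : String → List String → List String
  | _, [] => []
  | a, x :: t => if x = a then pvDD a t else x :: pvDD x t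

theorem pvFoldl_dd (l : List String) (acc : List String) (a : String) :
    l.foldl (fun out x => if out.getLast? = some x then out else out ++ [x]) (acc ++ [a])
      = acc ++ [a] ++ pvDD a l := by
  induction l generalizing acc a with
  | nil => simp [pvDD]
  | cons x t ih =>
    have hl : (acc ++ [a]).getLast? = some a := by simp
    simp only [List.foldl_cons, hl]
    by_cases h : a = x
    · subst h
      rw [if_pos rfl, ih acc a]
      simp [pvDD]
    · rw [if_neg (by simpa using h)]
      have hih := ih (acc ++ [a]) x
      rw [hih]
      simp only [pvDD, if_neg (fun hx : x = a => h hx.symm)]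
      simp [List.append_assoc]

theorem pvDD_sorted (l : List String) (a : String)
    (h : (a :: l).Pairwise (· ≤ ·)) :
    (a :: pvDD a l).Pairwise (· < ·) ∧ ∀ x, x ∈ a :: pvDD a l ↔ x ∈ a :: l := by
  induction l generalizing a with
  | nil => simp [pvDD]
  | cons x t ih =>
    have hax : a ≤ x := (List.pairwise_cons.mp h).1 x (by simp)
    have hat : ∀ y ∈ t, a ≤ y := fun y hy => (List.pairwise_cons.mp h).1 y (by simp [hy])
    have hxt : (x :: t).Pairwise (· ≤ ·) := (List.pairwise_cons.mp h).2
    by_cases hxa : x = a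
    · subst hxa
      have h' : (x :: t).Pairwise (· ≤ ·) := hxt
      obtain ⟨hp, hm⟩ := ih x h'
      refine ⟨by simpa [pvDD] using hp, fun y => ?_⟩
      simp only [pvDD]
      have := hm y
      simp only [List.mem_cons] at this ⊢
      tauto
    · obtain ⟨hp, hm⟩ := ih x hxt
      have haltx : a < x := lt_of_le_of_ne hax (fun he => hxa he.symm)
      constructor
      · simp only [pvDD, if_neg hxa]
        refine List.pairwise_cons.mpr ⟨?_, hp⟩
        intro y hy
        rcases List.mem_cons.mp hy with h1 | h1
        · exact h1 ▸ haltx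
        · -- y ∈ pvDD x t, so x < y by hp, hence a < y
          have : x < y := (List.pairwise_cons.mp hp).1 y h1
          exact lt_trans haltx this
      · intro y
        simp only [pvDD, if_neg hxa]
        have := hm y
        simp only [List.mem_cons] at this ⊢
        tauto

theorem pvStrict_eq (l1 : List String) : ∀ (l2 : List String),
    l1.Pairwise (· < ·) → l2.Pairwise (· < ·) →
    (∀ x, x ∈ l1 ↔ x ∈ l2) → l1 = l2 := by
  induction l1 with
  | nil =>
    intro l2 h1 h2 hm
    cases l2 with
    | nil => rfl
    | cons b s => exact absurd ((hm b).mpr (by simp)) (by simp)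
  | cons a t ih =>
    intro l2 h1 h2 hm
    cases l2 with
    | nil => exact absurd ((hm a).mp (by simp)) (by simp)
    | cons b s =>
      have hab : a = b := by
        by_contra hne
        have ha : a ∈ b :: s := (hm a).mp (by simp)
        have hb : b ∈ a :: t := (hm b).mpr (by simp)
        have h1' : a ∈ s := by rcases List.mem_cons.mp ha with h | h; exact absurd h hne; exact h
        have h2' : b ∈ t := by
          rcases List.mem_cons.mp hb with h | h
          · exact absurd h.symm hne
          · exact h
        have hba : b < a := (List.pairwise_cons.mp h2).1 a h1'
        have hab' : a < b := (List.pairwise_cons.mp h1).1 b h2'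
        exact absurd (lt_trans hba hab') (lt_irrefl b)
      subst hab
      have hts : ∀ x, x ∈ t ↔ x ∈ s := by
        intro x
        constructor
        · intro hx
          have hax : a < x := (List.pairwise_cons.mp h1).1 x hx
          have : x ∈ a :: s := (hm x).mp (by simp [hx])
          rcases List.mem_cons.mp this with h | h
          · exact absurd (h ▸ hax) (lt_irrefl a)
          · exact h
        · intro hx
          have hax : a < x := (List.pairwise_cons.mp h2).1 x hx
          have : x ∈ a :: t := (hm x).mpr (by simp [hx])
          rcases List.mem_cons.mp this with h | h
          · exact absurd (h ▸ hax) (lt_irrefl a)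
          · exact h
      exact congrArg (a :: ·) (ih s (List.pairwise_cons.mp h1).2 (List.pairwise_cons.mp h2).2 hts)

-- sorted(set(L)) equals adjacent-dedup of sorted(L)
theorem pvSortedSet_eq_dedup (L : List String) :
    PySem.List.sorted (PySem.Set.ofList L) (fun x => x) false
      = (PySem.List.sorted L (fun x => x) false).foldl
          (fun out x => if out.getLast? = some x then out else out ++ [x]) [] := by
  cases hs : PySem.List.sorted L (fun x => x) false with
  | nil =>
    have hL : L = [] := (PySem.List.sorted_eq_nil_iff L (fun x => x) false).mp hs
    subst hL
    rfl
  | cons a rest =>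
    have hrhs : (a :: rest).foldl
        (fun out x => if out.getLast? = some x then out else out ++ [x]) []
        = [a] ++ pvDD a rest := by
      simpa using pvFoldl_dd rest [] a
    rw [hrhs]
    have hpw : (a :: rest).Pairwise (· ≤ ·) := by
      have := PySem.List.sorted_pairwise (xs := L) (key := fun x => x)
      rw [hs] at this
      exact this
    obtain ⟨hddp, hddm⟩ := pvDD_sorted rest a hpw
    apply pvStrict_eq
    · exact PySem.List.sorted_ofList_pairwise_lt (xs := L)
    · exact hddp
    · intro x
      rw [PySem.List.mem_sorted, PySem.Set.mem_ofList, ← PySem.List.mem_sorted (key := fun x => x) (rev := false), hs]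
      exact (hddm x).symm

-- ===== VERDICT (by name: the statement is the Claim_ definition above) =====
theorem extract_all_area_names_py_spec : Claim_equal_extract_all_area_names_py := by
  intro row _
  unfold Spec_extract_all_area_names_py extract_all_area_names_py extract_all_area_names_py_alt
  rw [← pvSortedSet_eq_dedup]
  rw [PySem.Set.ofList_eq_foldl]
  simp only [pvStep_eq, pvFold_flat, pvFold_flat2, pvAreaSpec, List.flatMap_cons,
    List.flatMap_nil, List.append_nil, List.foldl_append, pvExt, PySem.Set.empty]
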